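-- pv_equiv track=rewrite | github.com/Mavhawk64/GeneralizednLinkRobotManipulatorSimulationAndControlDesign | lagrange.py | torque_matrix
-- ===== SOURCE A (Python) =====
-- def torque_rhs(N,p):
-- 	ret = "\\frac{\\tau_{"+str(p)+"}}{M_{"+str(p)+","+str(N)+"}l_{"+str(p)+"}}+"
-- 	for j in range(1,p):
-- 		ret += "l_{"+str(j)+"}\\dot\\theta_{"+str(j)+"}^2\\sin(\\theta_{"+str(j)+"}-\\theta_{"+str(p)+"})+"
-- 	ret = ret[:-1] + "-"
-- 	for n in range(p+1,N+1):
-- 		ret += "\\delta_{"+str(p)+","+str(n)+"}l_{"+str(n)+"}\\dot\\theta_{"+str(n)+"}^2\\sin(\\theta_{"+str(p)+"}-\\theta_{"+str(n)+"})-"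
-- 	ret += "g\\cos\\theta_{"+str(p)+"}"
-- 	return ret
--
-- def torque_matrix(N):
-- 	m = []
-- 	# Initialize matrix + set diagonal
-- 	for i in range(0,N):
-- 		m.append([])
-- 		for j in range(0,N+1):
-- 			m[i].append('')
-- 			if i == j:
-- 				m[i][j] = 'l_{'+str(j+1)+'}'
-- 	# Set top section
-- 	for i in range(0,N):
-- 		for j in range(i+1,N):
-- 			m[i][j] = '\\delta_{'+str(i+1)+","+str(j+1)+"}l_{"+str(j+1)+"}\\cos(\\theta_{"+str(i+1)+"}-\\theta_{"+str(j+1)+"})"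
-- 	# Set bot section
-- 	for i in range(0, N):
-- 		for j in range(0,i):
-- 			m[i][j] = "l_{"+str(j+1)+"}\\cos(\\theta_{"+str(j+1)+"}-\\theta_{"+str(i+1)+"})"
-- 	# Set RHS section
-- 	for i in range(0,N):
-- 		m[i][N] = torque_rhs(N,i+1)
-- 	return m
-- ===== SOURCE B (Python) =====
-- def torque_rhs(N,p):
-- 	ret = "\\frac{\\tau_{"+str(p)+"}}{M_{"+str(p)+","+str(N)+"}l_{"+str(p)+"}}+"
-- 	for j in range(1,p):
-- 		ret += "l_{"+str(j)+"}\\dot\\theta_{"+str(j)+"}^2\\sin(\\theta_{"+str(j)+"}-\\theta_{"+str(p)+"})+"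
-- 	ret = ret[:-1] + "-"
-- 	for n in range(p+1,N+1):
-- 		ret += "\\delta_{"+str(p)+","+str(n)+"}l_{"+str(n)+"}\\dot\\theta_{"+str(n)+"}^2\\sin(\\theta_{"+str(p)+"}-\\theta_{"+str(n)+"})-"
-- 	ret += "g\\cos\\theta_{"+str(p)+"}"
-- 	return ret
--
-- def _cell(N, i, j):
-- 	if j == N:
-- 		return torque_rhs(N, i + 1)
-- 	if i == j:
-- 		return "l_{" + str(j + 1) + "}"
-- 	if j > i:
-- 		return "\\delta_{" + str(i + 1) + "," + str(j + 1) + "}l_{" + str(j + 1) + "}\\cos(\\theta_{" + str(i + 1) + "}-\\theta_{" + str(j + 1) + "})"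
-- 	return "l_{" + str(j + 1) + "}\\cos(\\theta_{" + str(j + 1) + "}-\\theta_{" + str(i + 1) + "})"
--
-- def torque_matrix(N):
-- 	return [[_cell(N, i, j) for j in range(N + 1)] for i in range(N)]
-- ===== Notes on version B (the rewrite author's own statement) =====
-- stated objective: simpler
-- what changed: A mutates a pre-allocated matrix in four successive region sweeps (diagonal, upper triangle, lower triangle, RHS column); B builds the matrix in one nested comprehension that selects each cell's content by its position.
import Mathlib
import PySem

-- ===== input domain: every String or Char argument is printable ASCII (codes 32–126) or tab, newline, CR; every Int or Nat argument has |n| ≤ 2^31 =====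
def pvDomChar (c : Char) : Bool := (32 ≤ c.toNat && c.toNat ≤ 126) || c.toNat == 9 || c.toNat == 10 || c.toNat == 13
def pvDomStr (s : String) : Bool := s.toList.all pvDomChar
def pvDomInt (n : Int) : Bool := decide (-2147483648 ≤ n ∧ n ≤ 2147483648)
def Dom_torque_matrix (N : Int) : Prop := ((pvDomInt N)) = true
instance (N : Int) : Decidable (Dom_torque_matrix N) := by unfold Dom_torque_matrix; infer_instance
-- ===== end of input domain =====

-- B replaces A's four successive region sweeps over a mutated matrix by one nested
-- comprehension selecting each cell by position (objective: simpler, one pass).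

-- ===== PORT A =====
-- shared helper (B keeps torque_rhs unchanged)
def torque_rhs (N p : Int) : String :=
  let ret := "\\frac{\\tau_{" ++ PySem.Int.toStr p ++ "}}{M_{" ++ PySem.Int.toStr p ++ "," ++ PySem.Int.toStr N ++ "}l_{" ++ PySem.Int.toStr p ++ "}}+"
  let ret := (PySem.List.pyRange 1 p 1).foldl (fun ret j =>
    ret ++ "l_{" ++ PySem.Int.toStr j ++ "}\\dot\\theta_{" ++ PySem.Int.toStr j ++ "}^2\\sin(\\theta_{" ++ PySem.Int.toStr j ++ "}-\\theta_{" ++ PySem.Int.toStr p ++ "})+") ret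
  let ret := PySem.Str.slice ret none (some (-1)) ++ "-"
  let ret := (PySem.List.pyRange (p+1) (N+1) 1).foldl (fun ret n =>
    ret ++ "\\delta_{" ++ PySem.Int.toStr p ++ "," ++ PySem.Int.toStr n ++ "}l_{" ++ PySem.Int.toStr n ++ "}\\dot\\theta_{" ++ PySem.Int.toStr n ++ "}^2\\sin(\\theta_{" ++ PySem.Int.toStr p ++ "}-\\theta_{" ++ PySem.Int.toStr n ++ "})-") ret
  ret ++ "g\\cos\\theta_{" ++ PySem.Int.toStr p ++ "}"

def torque_matrix (N : Int) : List (List String) :=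
  let m : List (List String) := []
  -- Initialize matrix + set diagonal   (m.append([]); m[i].append(''); m[i][j] = …)
  let m := (PySem.List.pyRange 0 N 1).foldl (fun m i =>
    let m := m ++ [([] : List String)]
    (PySem.List.pyRange 0 (N+1) 1).foldl (fun m j =>
      let m := PySem.List.pySetD m i ((PySem.List.pyGetD m i []) ++ [""])
      if i == j then
        PySem.List.pySetD m i (PySem.List.pySetD (PySem.List.pyGetD m i []) j ("l_{" ++ PySem.Int.toStr (j+1) ++ "}"))
      else m) m) m
  -- Set top section
  let m := (PySem.List.pyRange 0 N 1).foldl (fun m i =>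
    (PySem.List.pyRange (i+1) N 1).foldl (fun m j =>
      PySem.List.pySetD m i (PySem.List.pySetD (PySem.List.pyGetD m i []) j
        ("\\delta_{" ++ PySem.Int.toStr (i+1) ++ "," ++ PySem.Int.toStr (j+1) ++ "}l_{" ++ PySem.Int.toStr (j+1) ++ "}\\cos(\\theta_{" ++ PySem.Int.toStr (i+1) ++ "}-\\theta_{" ++ PySem.Int.toStr (j+1) ++ "})"))) m) m
  -- Set bot section
  let m := (PySem.List.pyRange 0 N 1).foldl (fun m i =>
    (PySem.List.pyRange 0 i 1).foldl (fun m j =>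
      PySem.List.pySetD m i (PySem.List.pySetD (PySem.List.pyGetD m i []) j
        ("l_{" ++ PySem.Int.toStr (j+1) ++ "}\\cos(\\theta_{" ++ PySem.Int.toStr (j+1) ++ "}-\\theta_{" ++ PySem.Int.toStr (i+1) ++ "})"))) m) m
  -- Set RHS section
  let m := (PySem.List.pyRange 0 N 1).foldl (fun m i =>
    PySem.List.pySetD m i (PySem.List.pySetD (PySem.List.pyGetD m i []) N (torque_rhs N (i+1)))) m
  m

-- ===== PORT B =====
def tm_cell (N i j : Int) : String :=
  if j == N then torque_rhs N (i + 1)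
  else if i == j then "l_{" ++ PySem.Int.toStr (j + 1) ++ "}"
  else if j > i then
    "\\delta_{" ++ PySem.Int.toStr (i+1) ++ "," ++ PySem.Int.toStr (j+1) ++ "}l_{" ++ PySem.Int.toStr (j+1) ++ "}\\cos(\\theta_{" ++ PySem.Int.toStr (i+1) ++ "}-\\theta_{" ++ PySem.Int.toStr (j+1) ++ "})"
  else "l_{" ++ PySem.Int.toStr (j+1) ++ "}\\cos(\\theta_{" ++ PySem.Int.toStr (j+1) ++ "}-\\theta_{" ++ PySem.Int.toStr (i+1) ++ "})"

def torque_matrix_alt (N : Int) : List (List String) :=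
  (PySem.List.pyRange 0 N 1).map (fun i => (PySem.List.pyRange 0 (N+1) 1).map (fun j => tm_cell N i j))

-- ===== PRECONDITION & SPEC =====
def Spec_torque_matrix (N : Int) (out : List (List String)) : Prop := out = torque_matrix_alt N
instance (N : Int) (out : List (List String)) : Decidable (Spec_torque_matrix N out) := by unfold Spec_torque_matrix; infer_instance

-- ===== CLAIM (what is proved, stated in full; the proofs are below) =====
def Claim_equal_torque_matrix : Prop := ∀ (N : Int), Dom_torque_matrix N → Spec_torque_matrix N (torque_matrix N)

-- ===== LEMMAS AND PROOFS =====

-- L_fixed: a fold whose every step sets index i collapses to one set at i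
theorem L_fixed {ι α : Type} (G : ι → α → α) (d : α) (step : List α → ι → List α) :
    ∀ (l : List ι) (m : List α) (i : ℕ), i < m.length →
    (∀ (m' : List α) (j : ι), m'.length = m.length → step m' j = m'.set i (G j (m'.getD i d))) →
    l.foldl step m = m.set i (l.foldl (fun r j => G j r) (m.getD i d)) := by
  intro l
  induction l with
  | nil =>
    intro m i hi _
    simp [List.getElem?_eq_getElem hi, List.set_getElem_self]
  | cons j l ih =>
    intro m i hi hstep
    simp only [List.foldl_cons]
    rw [hstep m j rfl]
    rw [ih (m.set i (G j (m.getD i d))) i (by simpa using hi)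
        (by intro m' j' h; exact hstep m' j' (by simpa using h))]
    rw [List.set_set]
    congr 1
    rw [List.getD_eq_getElem?_getD, List.getElem?_set_self, List.getD_eq_getElem?_getD]
    · simp [hi]
    · exact hi

theorem L_set_last {α : Type} (m : List α) (a b : α) :
    (m ++ [a]).set m.length b = m ++ [b] := by
  induction m with
  | nil => rfl
  | cons x m ih => simp [List.set_cons_succ, ih]

theorem L_sweep {α : Type} (F : ℕ → α → α) (d : α) (step : List α → ℕ → List α) :
    ∀ (n : ℕ) (m : List α), n ≤ m.length →
    (∀ (m' : List α) (i : ℕ), m'.length = m.length → i < n →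
        step m' i = m'.set i (F i (m'.getD i d))) →
    (List.range n).foldl step m = m.mapIdx (fun i row => if i < n then F i row else row) := by
  intro n
  induction n with
  | zero =>
    intro m _ _
    simp only [List.range_zero, List.foldl_nil]
    apply List.ext_getElem (by simp)
    intro k h1 h2
    simp
  | succ n ih =>
    intro m hn hstep
    rw [List.range_succ, List.foldl_append, List.foldl_cons, List.foldl_nil]
    rw [ih m (by omega) (by intro m' i h hi ; exact hstep m' i h (by omega))]
    rw [hstep _ n (by simp) (by omega)]
    apply List.ext_getElem (by simp)
    intro k h1 h2
    simp only [List.length_mapIdx] at h2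
    by_cases hk : k = n
    · subst hk
      rw [List.getElem_set_self (by simpa using h2 )]
      rw [List.getD_eq_getElem?_getD, List.getElem?_eq_getElem (by simpa using h2)]
      simp [List.getElem_mapIdx]
    · rw [List.getElem_set_ne (by omega)]
      simp only [List.getElem_mapIdx]
      by_cases hlt : k < n
      · simp [hlt, show k < n + 1 by omega]
      · simp [hlt, show ¬ k < n + 1 by omega]

theorem L_build {α : Type} (rowf : ℕ → α) (step : List α → ℕ → List α)
    (hstep : ∀ (m' : List α) (i : ℕ), m'.length = i → step m' i = m' ++ [rowf i]) :
    ∀ (n : ℕ), (List.range n).foldl step [] = (List.range n).map rowf := by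
  intro n
  induction n with
  | zero => rfl
  | succ n ih =>
    rw [List.range_succ]
    rw [List.foldl_append, List.foldl_cons, List.foldl_nil, ih, hstep _ n (by simp)]
    simp

theorem L_initrow {α : Type} (v : ℕ → α) (e : α) (k : ℕ) :
    ∀ (n : ℕ), (List.range n).foldl
        (fun r j => if k = j then (r ++ [e]).set j (v j) else r ++ [e]) []
      = (List.range n).map (fun j => if k = j then v j else e) := by
  have hlen : ∀ (n : ℕ), ((List.range n).map (fun j => if k = j then v j else e)).length = n := by
    simp
  intro n
  induction n with
  | zero => rfl
  | succ n ih =>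
    rw [List.range_succ]
    rw [List.foldl_append, List.foldl_cons, List.foldl_nil, ih, List.map_append]
    by_cases hk : k = n
    · subst hk
      rw [if_pos rfl]
      have h := L_set_last (List.map (fun j => if k = j then v j else e) (List.range k)) e (v k)
      rw [hlen k] at h
      rw [h]
      simp
    · simp [hk]

theorem L_mapIdx_map_range {α : Type} (g : ℕ → α) (F : ℕ → α → α) (n : ℕ) :
    ((List.range n).map g).mapIdx (fun i r => if i < n then F i r else r)
      = (List.range n).map (fun i => F i (g i)) := by
  apply List.ext_getElem (by simp)
  intro k h1 h2
  simp only [List.getElem_mapIdx, List.getElem_map, List.getElem_range]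
  simp at h2
  simp [h2]
def diagN (j : ℕ) : String := "l_{" ++ PySem.Int.toStr ((j:Int)+1) ++ "}"
def topN (i j : ℕ) : String :=
  "\\delta_{" ++ PySem.Int.toStr ((i:Int)+1) ++ "," ++ PySem.Int.toStr ((j:Int)+1) ++ "}l_{" ++ PySem.Int.toStr ((j:Int)+1) ++ "}\\cos(\\theta_{" ++ PySem.Int.toStr ((i:Int)+1) ++ "}-\\theta_{" ++ PySem.Int.toStr ((j:Int)+1) ++ "})"
def botN (i j : ℕ) : String :=
  "l_{" ++ PySem.Int.toStr ((j:Int)+1) ++ "}\\cos(\\theta_{" ++ PySem.Int.toStr ((j:Int)+1) ++ "}-\\theta_{" ++ PySem.Int.toStr ((i:Int)+1) ++ "})"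
def initRowN (n k : ℕ) : List String := (List.range (n+1)).map (fun j => if k = j then diagN j else "")

theorem hr0 (n : ℕ) : PySem.List.pyRange 0 (n:Int) 1 = (List.range n).map (fun k => ((k:ℕ) : Int)) := by
  rw [PySem.List.pyRange_one]
  simp

theorem hr1 (n : ℕ) : PySem.List.pyRange 0 ((n:Int)+1) 1 = (List.range (n+1)).map (fun k => ((k:ℕ) : Int)) := by
  rw [PySem.List.pyRange_one]
  have : ((n:Int) + 1 - 0).toNat = n + 1 := by omega
  rw [this]
  simp

theorem Lphase1 (n : ℕ) :
    (PySem.List.pyRange 0 (n:Int) 1).foldl (fun m i =>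
      (PySem.List.pyRange 0 ((n:Int)+1) 1).foldl (fun m j =>
        let m := PySem.List.pySetD m i ((PySem.List.pyGetD m i []) ++ [""])
        if i == j then
          PySem.List.pySetD m i (PySem.List.pySetD (PySem.List.pyGetD m i []) j ("l_{" ++ PySem.Int.toStr (j+1) ++ "}"))
        else m) (m ++ [([] : List String)])) []
    = (List.range n).map (initRowN n) := by
  rw [hr0, List.foldl_map]
  apply L_build
  intro m' i hlen
  rw [hr1, List.foldl_map]
  have hil : i < (m' ++ [([] : List String)]).length := by simp; omega
  have hstep : ∀ (m'' : List (List String)) (j : ℕ), m''.length = (m' ++ [([] : List String)]).length →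
      (let m1 := PySem.List.pySetD m'' (i:ℕ) ((PySem.List.pyGetD m'' (i:ℕ) []) ++ [""])
        if ((i:ℕ) : Int) == ((j:ℕ) : Int) then
          PySem.List.pySetD m1 (i:ℕ) (PySem.List.pySetD (PySem.List.pyGetD m1 (i:ℕ) []) (j:ℕ) ("l_{" ++ PySem.Int.toStr ((j:ℕ)+1) ++ "}"))
        else m1)
      = m''.set i ((fun (j : ℕ) (r : List String) =>
          if i = j then (r ++ [""]).set j ("l_{" ++ PySem.Int.toStr (((j:ℕ):Int)+1) ++ "}") else r ++ [""]) j (m''.getD i [])) := by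
    intro m'' j h
    simp only [List.length_append, List.length_cons, List.length_nil, hlen] at h
    have hi : i < m''.length := by omega
    simp only [PySem.List.pySetD_natCast, PySem.List.pyGetD_natCast]
    have hbeq : (((i:ℕ):Int) == ((j:ℕ):Int)) = (i == j) := by
      by_cases hij : i = j <;> simp [hij]
    rw [hbeq]
    by_cases hij : i = j
    · subst hij
      simp only [beq_self_eq_true, if_true]
      rw [List.set_set]
      congr 1
      rw [List.getD_eq_getElem?_getD, List.getElem?_set_self hi]
      simp
    · simp [hij]
  refine ((L_fixed (fun (j : ℕ) (r : List String) =>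
          if i = j then (r ++ [""]).set j ("l_{" ++ PySem.Int.toStr (((j:ℕ):Int)+1) ++ "}") else r ++ [""])
      ([] : List String) _ (List.range (n+1)) (m' ++ [[]]) i hil hstep).trans ?_)
  have hget : (m' ++ [([] : List String)]).getD i [] = [] := by
    rw [List.getD_eq_getElem?_getD, List.getElem?_append_right (by omega : m'.length ≤ i)]
    simp [hlen]
  rw [hget, L_initrow, ← hlen, L_set_last]
  simp [initRowN, diagN]

def vTop (i : ℕ) (j : Int) : String :=
  "\\delta_{" ++ PySem.Int.toStr ((i:Int)+1) ++ "," ++ PySem.Int.toStr (j+1) ++ "}l_{" ++ PySem.Int.toStr (j+1) ++ "}\\cos(\\theta_{" ++ PySem.Int.toStr ((i:Int)+1) ++ "}-\\theta_{" ++ PySem.Int.toStr (j+1) ++ "})"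
def vBot (i : ℕ) (j : Int) : String :=
  "l_{" ++ PySem.Int.toStr (j+1) ++ "}\\cos(\\theta_{" ++ PySem.Int.toStr (j+1) ++ "}-\\theta_{" ++ PySem.Int.toStr ((i:Int)+1) ++ "})"

def FtopR (n i : ℕ) (row : List String) : List String :=
  (PySem.List.pyRange ((i:Int)+1) (n:Int) 1).foldl (fun r j => PySem.List.pySetD r j (vTop i j)) row
def FbotR (i : ℕ) (row : List String) : List String :=
  (PySem.List.pyRange 0 (i:Int) 1).foldl (fun r j => PySem.List.pySetD r j (vBot i j)) row
def FrhsR (n i : ℕ) (row : List String) : List String :=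
  PySem.List.pySetD row (n:Int) (torque_rhs (n:Int) ((i:Int)+1))

theorem L_lenI {α : Type} (v : Int → α) : ∀ (js : List Int) (r : List α),
    (js.foldl (fun r j => PySem.List.pySetD r j (v j)) r).length = r.length := by
  intro js
  induction js with
  | nil => intro r; rfl
  | cons j js ih => intro r; simp [List.foldl_cons, ih, PySem.List.length_pySetD]

theorem L_rowI {α : Type} (v : Int → α) : ∀ (js : List Int) (r : List α) (k : ℕ),
    (∀ j ∈ js, 0 ≤ j ∧ j.toNat < r.length) →
    (js.foldl (fun r j => PySem.List.pySetD r j (v j)) r)[k]? =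
      if (k : Int) ∈ js then some (v k) else r[k]? := by
  intro js
  induction js with
  | nil => intro r k _; simp
  | cons j js ih =>
    intro r k hjs
    obtain ⟨hj0, hjl⟩ := hjs j List.mem_cons_self
    simp only [List.foldl_cons]
    rw [ih _ k (by
      intro j' hj'
      obtain ⟨h0, hl⟩ := hjs j' (List.mem_cons_of_mem _ hj')
      exact ⟨h0, by simpa [PySem.List.length_pySetD] using hl⟩)]
    rw [PySem.List.pySetD_of_nonneg _ _ hj0]
    by_cases hk : (k : Int) ∈ js
    · simp [hk]
    · by_cases hkj : (k : Int) = j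
      · subst hkj
        simp [hk, List.getElem?_set_self (show k < r.length by simpa using hjl)]
      · have : j.toNat ≠ k := by omega
        simp [hk, hkj, List.getElem?_set_ne this]

theorem Louter {α : Type} (n : ℕ) (d : α) (step : List α → Int → List α) (F : ℕ → α → α)
    (m : List α) (hm : m.length = n)
    (hstep : ∀ (m' : List α) (i : ℕ), m'.length = n → i < n →
        step m' ((i:ℕ) : Int) = m'.set i (F i (m'.getD i d))) :
    (PySem.List.pyRange 0 (n:Int) 1).foldl step m
      = m.mapIdx (fun i row => if i < n then F i row else row) := by
  rw [hr0, List.foldl_map]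
  exact L_sweep F d _ n m (by omega) (fun m' i h hi => hstep m' i (h.trans hm) hi)

theorem getElem?_map_range {β : Type} (f : ℕ → β) (n k : ℕ) (hk : k < n) :
    ((List.range n).map f)[k]? = some (f k) := by
  simp [hk]

theorem Lrow (n i : ℕ) (hi : i < n) :
    FrhsR n i (FbotR i (FtopR n i (initRowN n i)))
      = (List.range (n+1)).map (fun (j:ℕ) => tm_cell (n:Int) (i:Int) (j:Int)) := by
  have hlen0 : (initRowN n i).length = n + 1 := by simp [initRowN]
  have hlen1 : (FtopR n i (initRowN n i)).length = n + 1 := by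
    rw [FtopR, L_lenI]; exact hlen0
  have hlen2 : (FbotR i (FtopR n i (initRowN n i))).length = n + 1 := by
    rw [FbotR, L_lenI]; exact hlen1
  have hbbnd : ∀ j ∈ PySem.List.pyRange 0 (i:Int) 1,
      0 ≤ j ∧ j.toNat < (FtopR n i (initRowN n i)).length := by
    intro j hj
    rw [PySem.List.mem_pyRange_one] at hj
    exact ⟨hj.1, by omega⟩
  have htbnd : ∀ j ∈ PySem.List.pyRange ((i:Int)+1) (n:Int) 1,
      0 ≤ j ∧ j.toNat < (initRowN n i).length := by
    intro j hj
    rw [PySem.List.mem_pyRange_one] at hj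
    constructor
    · omega
    · rw [hlen0]; omega
  apply List.ext_getElem?
  intro k
  unfold FrhsR
  rw [PySem.List.pySetD_natCast]
  by_cases hk : k < n + 1
  · rw [getElem?_map_range _ _ _ hk]
    by_cases hkn : k = n
    · subst hkn
      rw [List.getElem?_set_self (by omega)]
      simp [tm_cell]
    · rw [List.getElem?_set_ne (by omega : n ≠ k)]
      have h1 : (((k:ℕ):Int) == ((n:ℕ):Int)) = false := by simp; omega
      rw [FbotR, L_rowI (vBot i) _ _ k hbbnd]
      by_cases hki : k < i
      · rw [if_pos (by rw [PySem.List.mem_pyRange_one]; omega)]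
        have h2 : (((i:ℕ):Int) == ((k:ℕ):Int)) = false := by simp; omega
        have h3 : ¬(((k:ℕ):Int) > ((i:ℕ):Int)) := by omega
        simp [tm_cell, h1, h2, h3, vBot]
      · rw [if_neg (by rw [PySem.List.mem_pyRange_one]; omega)]
        rw [FtopR, L_rowI (vTop i) _ _ k htbnd]
        by_cases hik : i < k
        · rw [if_pos (by rw [PySem.List.mem_pyRange_one]; omega)]
          have h2 : (((i:ℕ):Int) == ((k:ℕ):Int)) = false := by simp; omega
          have h3 : (((k:ℕ):Int) > ((i:ℕ):Int)) := by omega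
          simp [tm_cell, h1, h2, h3, vTop]
        · rw [if_neg (by rw [PySem.List.mem_pyRange_one]; omega)]
          have hik' : i = k := by omega
          subst hik'
          simp [initRowN, tm_cell, h1, show i < n + 1 by omega, diagN]
  · rw [List.getElem?_set_ne (by omega : n ≠ k)]
    rw [List.getElem?_eq_none (by omega), List.getElem?_eq_none (by simp; omega)]

theorem tm_main (N : Int) : torque_matrix N = torque_matrix_alt N := by
  by_cases hN : N ≤ 0
  · simp [torque_matrix, torque_matrix_alt, PySem.List.pyRange_one_eq_nil hN]
  · obtain ⟨n, rfl⟩ : ∃ n : ℕ, N = (n : Int) := ⟨N.toNat, by omega⟩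
    simp only [torque_matrix, torque_matrix_alt]
    rw [Lphase1]
    rw [Louter n ([] : List String) _ (fun i row => FtopR n i row)
      ((List.range n).map (initRowN n)) (by simp)
      (by
        intro m' i hm' hi
        refine ((L_fixed (fun (j : Int) (r : List String) => PySem.List.pySetD r j (vTop i j))
          ([] : List String) _ (PySem.List.pyRange ((i:Int)+1) (n:Int) 1) m' i (by omega) ?_).trans ?_)
        · intro m'' j h
          simp [vTop]
        · rfl)]
    rw [L_mapIdx_map_range]
    rw [Louter n ([] : List String) _ (fun i row => FbotR i row)
      ((List.range n).map (fun i => FtopR n i (initRowN n i))) (by simp)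
      (by
        intro m' i hm' hi
        refine ((L_fixed (fun (j : Int) (r : List String) => PySem.List.pySetD r j (vBot i j))
          ([] : List String) _ (PySem.List.pyRange 0 (i:Int) 1) m' i (by omega) ?_).trans ?_)
        · intro m'' j h
          simp [vBot]
        · rfl)]
    rw [L_mapIdx_map_range]
    rw [Louter n ([] : List String) _ (fun i row => FrhsR n i row)
      ((List.range n).map (fun i => FbotR i (FtopR n i (initRowN n i)))) (by simp)
      (by
        intro m' i hm' hi
        simp [FrhsR])]
    rw [L_mapIdx_map_range]
    rw [hr0]
    simp only [hr1, List.map_map]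
    apply List.map_congr_left
    intro i hi
    rw [List.mem_range] at hi
    have := Lrow n i hi
    simpa [Function.comp] using this

-- ===== VERDICT (by name: the statement is the Claim_ definition above) =====
theorem torque_matrix_spec : Claim_equal_torque_matrix := by
  intro N _
  unfold Spec_torque_matrix
  exact tm_main N
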